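-- pv_equiv track=rewrite | github.com/Severag/Advent_of_Code_2022 | Day 23/day_23.py | get_move
-- ===== SOURCE A (Python) =====
-- def get_move(point, locs, dir1):
--     directions = [(-1,0), (1,0), (0,-1), (0,1)]
--     adjacents = [False] * 4  # are there elves to the [N, S, E, W]
--     #                                                  0  1  2  3
--     for r in [-1,0,1]:
--         for c in [-1, 0, 1]:
--             if not r == c == 0 and (point[0] + r, point[1] + c) in locs:
--                 if r != 0:  # North or South
--                     adjacents[(r + 1) // 2] = True  # 0 or 1
--
--                 if c != 0:  # East or West
--                     adjacents[(c + 5) // 2] = True  # 2 or 3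
--
--     # if we have no adjacents or adjacents in all directions
--     if not True in adjacents or not False in adjacents:
--         return point  # stay put
--
--     # else
--     for idx in range(dir1, dir1 + 4):
--         idx %= 4  # to start with dir1 and work our way around
--         if not adjacents[idx]:  # if there were no adjacents in this direction
--
--             return (point[0] + directions[idx][0], point[1] + directions[idx][1])
-- ===== SOURCE B (Python) =====
-- def get_move(point, locs, dir1):
--     r, c = point
--     has_neighbor = False
--     for dr in (-1, 0, 1):
--         for dc in (-1, 0, 1):
--             if (dr, dc) != (0, 0) and (r + dr, c + dc) in locs:
--                 has_neighbor = True
--     if not has_neighbor: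
--         return point
--     checks = [[(-1, -1), (-1, 0), (-1, 1)],   # N
--               [(1, -1), (1, 0), (1, 1)],      # S
--               [(-1, -1), (0, -1), (1, -1)],   # E (col -1, as A labels it)
--               [(-1, 1), (0, 1), (1, 1)]]      # W (col +1)
--     moves = [(-1, 0), (1, 0), (0, -1), (0, 1)]
--     for i in range(4):
--         idx = (dir1 + i) % 4
--         if all((r + dr, c + dc) not in locs for dr, dc in checks[idx]):
--             dr, dc = moves[idx]
--             return (r + dr, c + dc)
--     return point
-- ===== Notes on version B (the rewrite author's own statement) =====
-- stated objective: simpler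
-- what changed: Replaced A's precomputed 4-flag adjacents table (built with index arithmetic (r+1)//2 / (c+5)//2 and queried via True/False membership) by a single has_neighbor scan of the 8 surrounding cells plus on-demand checking of each direction's three cells in priority order (dir1+i)%4.
import Mathlib
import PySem

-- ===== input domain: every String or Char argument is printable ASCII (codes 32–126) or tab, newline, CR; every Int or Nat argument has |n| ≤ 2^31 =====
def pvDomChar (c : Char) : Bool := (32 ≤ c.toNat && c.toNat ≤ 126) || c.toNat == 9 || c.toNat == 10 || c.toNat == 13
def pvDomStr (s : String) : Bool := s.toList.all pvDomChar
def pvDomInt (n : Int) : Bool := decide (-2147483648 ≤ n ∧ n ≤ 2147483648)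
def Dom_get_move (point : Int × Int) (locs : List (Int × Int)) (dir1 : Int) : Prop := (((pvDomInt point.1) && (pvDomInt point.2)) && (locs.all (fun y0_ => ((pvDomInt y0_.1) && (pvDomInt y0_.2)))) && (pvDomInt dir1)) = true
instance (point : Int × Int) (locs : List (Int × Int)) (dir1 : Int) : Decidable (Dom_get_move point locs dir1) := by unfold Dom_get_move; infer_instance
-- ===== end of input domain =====

-- B drops A's precomputed 4-flag adjacents table: one pass sets a single has_neighbor flag,
-- then each direction's three check cells are scanned on demand in priority order (objective: simpler decomposition).

-- ===== PORT A =====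
-- early-return loop 'for idx in range(dir1, dir1+4)': first free direction wins (none = fell off the loop)
def get_move_loopA (point : Int × Int) (directions : List (Int × Int))
    (adjacents : List Bool) : List Int → Option (Int × Int)
  | [] => none
  | idx :: rest =>
      let idx2 := PySem.Int.mod idx 4
      if PySem.List.pyGetD adjacents idx2 false = false then
        let d := PySem.List.pyGetD directions idx2 (0, 0)
        some (point.1 + d.1, point.2 + d.2)
      else get_move_loopA point directions adjacents rest

def get_move (point : Int × Int) (locs : List (Int × Int)) (dir1 : Int) : Int × Int :=
  let directions : List (Int × Int) := [(-1, 0), (1, 0), (0, -1), (0, 1)]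
  let adjacents : List Bool :=
    [(-1 : Int), 0, 1].foldl (fun adj r =>
      [(-1 : Int), 0, 1].foldl (fun adj c =>
        if !(decide (r = 0) && decide (c = 0)) && locs.contains (point.1 + r, point.2 + c) then
          let adj := if r ≠ 0 then PySem.List.pySetD adj (PySem.Int.floordiv (r + 1) 2) true else adj
          if c ≠ 0 then PySem.List.pySetD adj (PySem.Int.floordiv (c + 5) 2) true else adj
        else adj) adj) [false, false, false, false]
  if !(adjacents.contains true) || !(adjacents.contains false) then point
  else
    -- Python falls off this loop (returning None) only when all four directions are blocked,
    -- in which case the branch above already returned; 'point' here is an unreachable default.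
    (get_move_loopA point directions adjacents (PySem.List.pyRange dir1 (dir1 + 4) 1)).getD point

-- ===== PORT B =====
def get_move_altChecks : List (List (Int × Int)) :=
  [[(-1, -1), (-1, 0), (-1, 1)],
   [(1, -1), (1, 0), (1, 1)],
   [(-1, -1), (0, -1), (1, -1)],
   [(-1, 1), (0, 1), (1, 1)]]

def get_move_altMoves : List (Int × Int) := [(-1, 0), (1, 0), (0, -1), (0, 1)]

-- early-return loop 'for i in range(4)': scan the three check cells of direction (dir1+i)%4
def get_move_altLoop (point : Int × Int) (locs : List (Int × Int)) (dir1 : Int) : List Int → Int × Int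
  | [] => point
  | i :: rest =>
      let idx := PySem.Int.mod (dir1 + i) 4
      if (PySem.List.pyGetD get_move_altChecks idx []).all
           (fun q => !locs.contains (point.1 + q.1, point.2 + q.2)) then
        let m := PySem.List.pyGetD get_move_altMoves idx (0, 0)
        (point.1 + m.1, point.2 + m.2)
      else get_move_altLoop point locs dir1 rest

def get_move_alt (point : Int × Int) (locs : List (Int × Int)) (dir1 : Int) : Int × Int :=
  let hasNeighbor :=
    [(-1 : Int), 0, 1].foldl (fun h dr =>
      [(-1 : Int), 0, 1].foldl (fun h dc =>
        if !(decide (dr = 0) && decide (dc = 0)) && locs.contains (point.1 + dr, point.2 + dc)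
        then true else h) h) false
  if !hasNeighbor then point
  else get_move_altLoop point locs dir1 (PySem.List.pyRange 0 4 1)

-- ===== PRECONDITION & SPEC =====
def Spec_get_move (point : Int × Int) (locs : List (Int × Int)) (dir1 : Int) (out : Int × Int) : Prop := out = get_move_alt point locs dir1
instance (point : Int × Int) (locs : List (Int × Int)) (dir1 : Int) (out : Int × Int) : Decidable (Spec_get_move point locs dir1 out) := by unfold Spec_get_move; infer_instance

-- ===== CLAIM (what is proved, stated in full; the proofs are below) =====
def Claim_equal_get_move : Prop := ∀ (point : Int × Int) (locs : List (Int × Int)) (dir1 : Int), Dom_get_move point locs dir1 → Spec_get_move point locs dir1 (get_move point locs dir1)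

-- ===== LEMMAS AND PROOFS =====
set_option maxHeartbeats 16000000 in
theorem adjA_eq (x y : Int) (locs : List (Int × Int)) :
    ([(-1:Int), 0, 1].foldl (fun adj r =>
      [(-1:Int), 0, 1].foldl (fun adj c =>
        if !(decide (r = 0) && decide (c = 0)) && locs.contains (x + r, y + c) then
          let adj := if r ≠ 0 then PySem.List.pySetD adj (PySem.Int.floordiv (r + 1) 2) true else adj
          if c ≠ 0 then PySem.List.pySetD adj (PySem.Int.floordiv (c + 5) 2) true else adj
        else adj) adj) [false, false, false, false]) =
    [locs.contains (x + -1, y + -1) || (locs.contains (x + -1, y + 0) || locs.contains (x + -1, y + 1)),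
     locs.contains (x + 1, y + -1) || (locs.contains (x + 1, y + 0) || locs.contains (x + 1, y + 1)),
     locs.contains (x + -1, y + -1) || (locs.contains (x + 0, y + -1) || locs.contains (x + 1, y + -1)),
     locs.contains (x + -1, y + 1) || (locs.contains (x + 0, y + 1) || locs.contains (x + 1, y + 1))] := by
  simp only [List.foldl_cons, List.foldl_nil, Int.reduceEq, Int.reduceAdd, Int.reduceNeg,
    decide_true, decide_false, Bool.not_false, Bool.not_true, Bool.true_and,
    Bool.false_and, Bool.not_and, Bool.or_false, Bool.false_or, ne_eq,
    not_false_iff, not_true, reduceIte, PySem.Int.floordiv]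
  generalize locs.contains (x + -1, y + -1) = b1
  generalize locs.contains (x + -1, y + 0) = b2
  generalize locs.contains (x + -1, y + 1) = b3
  generalize locs.contains (x + 0, y + -1) = b4
  generalize locs.contains (x + 0, y + 1) = b5
  generalize locs.contains (x + 1, y + -1) = b6
  generalize locs.contains (x + 1, y + 0) = b7
  generalize locs.contains (x + 1, y + 1) = b8
  cases b1 <;> cases b2 <;> cases b3 <;> cases b4 <;>
  cases b5 <;> cases b6 <;> cases b7 <;> cases b8 <;> rfl

set_option maxHeartbeats 64000000 in
theorem get_move_main (x y : Int) (locs : List (Int × Int)) (d : Int) :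
    get_move (x, y) locs d = get_move_alt (x, y) locs d := by
  have h1 : PySem.List.pyRange d (d + 4) = [d, d + 1, d + 2, d + 3] := by
    rw [PySem.List.pyRange_one_cons (by omega), PySem.List.pyRange_one_cons (by omega),
        PySem.List.pyRange_one_cons (by omega), PySem.List.pyRange_one_cons (by omega)]
    have h0 : PySem.List.pyRange (d + 1 + 1 + 1 + 1) (d + 4) = [] := by
      simp [List.eq_nil_iff_forall_not_mem, PySem.List.mem_pyRange_one]
      omega
    rw [h0]
    norm_num
    omega
  have h04 : PySem.List.pyRange 0 4 = [0, 1, 2, 3] := by decide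
  have m4 : ∀ a : Int, PySem.Int.mod a 4 = a % 4 :=
    fun a => PySem.Int.mod_eq_emod_of_pos (by norm_num)
  have hd : d % 4 = 0 ∨ d % 4 = 1 ∨ d % 4 = 2 ∨ d % 4 = 3 := by omega
  have e0 : (d + 0) % 4 = d % 4 := by omega
  have e1 : (d + 1) % 4 = (d % 4 + 1) % 4 := by omega
  have e2 : (d + 2) % 4 = (d % 4 + 2) % 4 := by omega
  have e3 : (d + 3) % 4 = (d % 4 + 3) % 4 := by omega
  have gC0 : PySem.List.pyGetD get_move_altChecks (0 : Int) [] = [(-1, -1), (-1, 0), (-1, 1)] := by decide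
  have gC1 : PySem.List.pyGetD get_move_altChecks (1 : Int) [] = [(1, -1), (1, 0), (1, 1)] := by decide
  have gC2 : PySem.List.pyGetD get_move_altChecks (2 : Int) [] = [(-1, -1), (0, -1), (1, -1)] := by decide
  have gC3 : PySem.List.pyGetD get_move_altChecks (3 : Int) [] = [(-1, 1), (0, 1), (1, 1)] := by decide
  simp only [get_move, get_move_alt, h1, h04]
  rw [adjA_eq x y locs]
  simp only [get_move_loopA, get_move_altLoop, m4, List.foldl_cons, List.foldl_nil,
    Int.reduceEq, Int.reduceNeg, decide_true, decide_false, Bool.not_false, Bool.not_true,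
    Bool.true_and, Bool.false_and]
  rw [e0, e1, e2, e3]
  rcases hd with h | h | h | h <;>
  (rw [h]
   simp only [Int.reduceAdd, Int.reduceMod, gC0, gC1, gC2, gC3,
     List.all_cons, List.all_nil, Bool.and_true]
   generalize locs.contains (x + -1, y + -1) = b1
   generalize locs.contains (x + -1, y + 0) = b2
   generalize locs.contains (x + -1, y + 1) = b3
   generalize locs.contains (x + 0, y + -1) = b4
   generalize locs.contains (x + 0, y + 1) = b5
   generalize locs.contains (x + 1, y + -1) = b6
   generalize locs.contains (x + 1, y + 0) = b7
   generalize locs.contains (x + 1, y + 1) = b8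
   cases b1 <;> cases b2 <;> cases b3 <;> cases b4 <;>
   cases b5 <;> cases b6 <;> cases b7 <;> cases b8 <;> rfl)

-- ===== VERDICT (by name: the statement is the Claim_ definition above) =====
theorem get_move_spec : Claim_equal_get_move := by
  intro point locs dir1 _
  obtain ⟨x, y⟩ := point
  exact get_move_main x y locs dir1
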